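-- pv_equiv track=rewrite | github.com/virtual-phone-dev/fb-bot | rchef.py | fichiers_modifies
-- ===== SOURCE A (Python) =====
-- def fichiers_modifies(source_hashes, target_hashes):
--     # Vérifie si un fichier source a changé ou si un nouveau fichier est présent
--     for f in source_hashes:
--         if f not in target_hashes or source_hashes[f] != target_hashes[f]:
--             return True
--     # Vérifie s'il y a des fichiers dans target_hashes qui ne sont pas dans source_hashes
--     for f in target_hashes:
--         if f not in source_hashes:
--             return True
--     return False
-- ===== SOURCE B (Python) =====
-- def fichiers_modifies(source_hashes, target_hashes):
--     # Two dicts differ exactly when dict inequality says so.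
--     return source_hashes != target_hashes
-- ===== Notes on version B (the rewrite author's own statement) =====
-- stated objective: simpler
-- what changed: Replaced the two explicit key-scanning loops with a single built-in dict inequality test (dict != already compares key sets and all corresponding values).
import Mathlib
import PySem

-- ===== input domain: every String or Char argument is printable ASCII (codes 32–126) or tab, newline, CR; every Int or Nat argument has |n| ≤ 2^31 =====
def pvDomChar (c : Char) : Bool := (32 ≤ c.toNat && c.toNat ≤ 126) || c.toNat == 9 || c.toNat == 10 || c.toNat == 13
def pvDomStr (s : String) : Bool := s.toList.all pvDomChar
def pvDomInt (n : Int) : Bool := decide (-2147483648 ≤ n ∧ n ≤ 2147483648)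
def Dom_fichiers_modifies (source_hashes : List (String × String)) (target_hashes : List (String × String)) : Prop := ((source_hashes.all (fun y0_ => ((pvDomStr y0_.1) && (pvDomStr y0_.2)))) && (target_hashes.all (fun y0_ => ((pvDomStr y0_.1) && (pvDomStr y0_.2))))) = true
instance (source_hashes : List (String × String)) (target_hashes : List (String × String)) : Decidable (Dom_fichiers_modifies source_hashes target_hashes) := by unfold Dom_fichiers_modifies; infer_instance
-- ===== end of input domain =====

-- B replaces A's two explicit key-scanning loops with Python's built-in dict inequality (simpler).


-- ===== PORT A =====
-- second loop: 'for f in target_hashes: if f not in source_hashes: return True' then 'return False'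
def fichiersLoop2 (s : PySem.Dict String String) (tkeys : List String) : Bool :=
  match tkeys with
  | [] => false
  | f :: rest => if !(s.contains f) then true else fichiersLoop2 s rest

-- first loop: 'for f in source_hashes: if f not in target_hashes or source_hashes[f] != target_hashes[f]: return True'
def fichiersLoop1 (s t : PySem.Dict String String) (skeys tkeys : List String) : Bool :=
  match skeys with
  | [] => fichiersLoop2 s tkeys
  | f :: rest =>
      if !(t.contains f) || !(s.get? f == t.get? f) then true
      else fichiersLoop1 s t rest tkeys

def fichiers_modifies (source_hashes : List (String × String)) (target_hashes : List (String × String)) : Bool :=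
  let s := PySem.Dict.mk source_hashes
  let t := PySem.Dict.mk target_hashes
  fichiersLoop1 s t s.keys t.keys

-- ===== PORT B =====
-- Python dict equality (CPython dict_equal): equal lengths and every item of the left dict found in the right.
def pyDictEq (s t : PySem.Dict String String) : Bool :=
  s.size == t.size && s.items.all (fun p => t.get? p.1 == some p.2)

-- 'return source_hashes != target_hashes'
def fichiers_modifies_alt (source_hashes : List (String × String)) (target_hashes : List (String × String)) : Bool :=
  !(pyDictEq (PySem.Dict.mk source_hashes) (PySem.Dict.mk target_hashes))

-- ===== PRECONDITION & SPEC =====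
-- The arguments are Python dicts, so their association-list representations have pairwise-distinct
-- keys; Pre_ states exactly that (no Python input is excluded: a dict cannot hold duplicate keys).
def Pre_fichiers_modifies (source_hashes : List (String × String)) (target_hashes : List (String × String)) : Prop :=
  (source_hashes.map Prod.fst).Nodup ∧ (target_hashes.map Prod.fst).Nodup
instance (source_hashes : List (String × String)) (target_hashes : List (String × String)) : Decidable (Pre_fichiers_modifies source_hashes target_hashes) := by unfold Pre_fichiers_modifies; infer_instance

def pvWitness_fichiers_modifies : (List (String × String)) × (List (String × String)) :=
  ([("a.txt", "h1")], [("b.txt", "h2")])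

def Spec_fichiers_modifies (source_hashes : List (String × String)) (target_hashes : List (String × String)) (out : Bool) : Prop := out = fichiers_modifies_alt source_hashes target_hashes
instance (source_hashes : List (String × String)) (target_hashes : List (String × String)) (out : Bool) : Decidable (Spec_fichiers_modifies source_hashes target_hashes out) := by unfold Spec_fichiers_modifies; infer_instance

-- ===== CLAIM (what is proved, stated in full; the proofs are below) =====
def Claim_equal_fichiers_modifies : Prop := ∀ (source_hashes : List (String × String)) (target_hashes : List (String × String)), Dom_fichiers_modifies source_hashes target_hashes → Pre_fichiers_modifies source_hashes target_hashes → Spec_fichiers_modifies source_hashes target_hashes (fichiers_modifies source_hashes target_hashes)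

-- ===== LEMMAS AND PROOFS =====

theorem fichiersLoop2_eq (s : PySem.Dict String String) (tkeys : List String) :
    fichiersLoop2 s tkeys = tkeys.any (fun f => !(s.contains f)) := by
  induction tkeys with
  | nil => rfl
  | cons f rest ih =>
      simp only [fichiersLoop2, List.any_cons, ← ih]
      by_cases h : s.contains f <;> simp [h]

theorem fichiersLoop1_eq (s t : PySem.Dict String String) (skeys tkeys : List String) :
    fichiersLoop1 s t skeys tkeys =
      (skeys.any (fun f => !(t.contains f) || !(s.get? f == t.get? f)) ||
        tkeys.any (fun f => !(s.contains f))) := by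
  induction skeys with
  | nil => simp [fichiersLoop1, fichiersLoop2_eq]
  | cons f rest ih =>
      simp only [fichiersLoop1, List.any_cons]
      by_cases h : (!(t.contains f) || !(s.get? f == t.get? f)) = true <;> simp_all

-- Characterisation: A's two loops all pass iff Python's dict equality holds.
theorem dictEq_char (s t : PySem.Dict String String)
    (hns : s.keys.Nodup) (hnt : t.keys.Nodup) :
    ((∀ f ∈ s.keys, t.contains f = true ∧ s.get? f = t.get? f) ∧
      (∀ f ∈ t.keys, s.contains f = true)) ↔
    (s.size = t.size ∧ ∀ p ∈ s.items, t.get? p.1 = some p.2) := by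
  have hkey : ∀ f, f ∈ s.keys ↔ ∃ v, (f, v) ∈ s.items := by
    intro f
    simp [PySem.Dict.keys, List.mem_map, Prod.exists, eq_comm]
  constructor
  · rintro ⟨h1, h2⟩
    have hperm : List.Perm s.keys t.keys := by
      refine (List.perm_ext_iff_of_nodup hns hnt).mpr (fun f => ⟨fun hf => ?_, fun hf => ?_⟩)
      · exact (PySem.Dict.contains_iff_mem_keys t f).mp (h1 f hf).1
      · exact (PySem.Dict.contains_iff_mem_keys s f).mp (h2 f hf)
    refine ⟨?_, ?_⟩
    · simpa [PySem.Dict.size, PySem.Dict.keys] using hperm.length_eq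
    · rintro ⟨f, v⟩ hp
      have hf : f ∈ s.keys := (hkey f).mpr ⟨v, hp⟩
      have hsg : s.get? f = some v := PySem.Dict.get?_of_mem_items s hp hns
      exact ((h1 f hf).2).symm.trans hsg
  · rintro ⟨hsz, hall⟩
    have h1 : ∀ f ∈ s.keys, t.contains f = true ∧ s.get? f = t.get? f := by
      intro f hf
      obtain ⟨v, hv⟩ := (hkey f).mp hf
      have hsg : s.get? f = some v := PySem.Dict.get?_of_mem_items s hv hns
      have htg : t.get? f = some v := hall _ hv
      have hc : t.contains f = true := by
        rw [PySem.Dict.contains_eq_isSome_get?, htg]; rfl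
      exact ⟨hc, hsg.trans htg.symm⟩
    refine ⟨h1, ?_⟩
    have hsub : s.keys ⊆ t.keys := fun f hf =>
      (PySem.Dict.contains_iff_mem_keys t f).mp (h1 f hf).1
    have hlen : t.keys.length ≤ s.keys.length := by
      have h1' : s.size = s.keys.length := by simp [PySem.Dict.size, PySem.Dict.keys]
      have h2' : t.size = t.keys.length := by simp [PySem.Dict.size, PySem.Dict.keys]
      omega
    have hperm : List.Perm s.keys t.keys := (hns.subperm hsub).perm_of_length_le hlen
    intro f hf
    exact (PySem.Dict.contains_iff_mem_keys s f).mpr (hperm.mem_iff.mpr hf)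

-- ===== VERDICT (by name: the statement is the Claim_ definition above) =====
theorem fichiers_modifies_spec : Claim_equal_fichiers_modifies := by
  intro src tgt _hdom hpre
  unfold Spec_fichiers_modifies fichiers_modifies fichiers_modifies_alt pyDictEq
  set s := PySem.Dict.mk src with hs
  set t := PySem.Dict.mk tgt with ht
  have hns : s.keys.Nodup := hpre.1
  have hnt : t.keys.Nodup := hpre.2
  rw [fichiersLoop1_eq, Bool.eq_iff_iff]
  have hchar := dictEq_char s t hns hnt
  simp only [Bool.or_eq_true, List.any_eq_true, Bool.not_eq_true',
    beq_eq_false_iff_ne, ne_eq]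
  rw [Bool.eq_false_iff]
  simp only [ne_eq, Bool.and_eq_true, beq_iff_eq, List.all_eq_true, beq_iff_eq]
  rw [← hchar]
  constructor
  · rintro (⟨f, hf, hb⟩ | ⟨f, hf, hb⟩) ⟨h1, h2⟩
    · rcases hb with hb | hb
      · rw [(h1 f hf).1] at hb; cases hb
      · exact hb ((h1 f hf).2)
    · rw [h2 f hf] at hb; cases hb
  · intro hn
    by_contra hno
    push Not at hno
    obtain ⟨hA, hB⟩ := hno
    exact hn ⟨fun f hf => ⟨Bool.ne_false_iff.mp (hA f hf).1, (hA f hf).2⟩,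
      fun f hf => Bool.ne_false_iff.mp (hB f hf)⟩
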